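-- pv_equiv track=rewrite | github.com/sakhnik/o-event | src/o_event/cli.py | resolve_command
-- ===== SOURCE A (Python) =====
-- def resolve_command(cmd, commands):
--     """
--     Resolve a possibly abbreviated command to full command.
--     If multiple matches exist, return None (ambiguous).
--     """
--     matches = [c for c in commands if c.startswith(cmd)]
--     if len(matches) == 1:
--         return matches[0]
--     elif cmd in commands:
--         return cmd  # exact match
--     else:
--         return None  # ambiguous or unknown
-- ===== SOURCE B (Python) =====
-- def resolve_command(cmd, commands):
--     """
--     Resolve a possibly abbreviated command to full command.
--     If multiple matches exist, return None (ambiguous).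
--
--     Sorts the commands: all prefix matches of cmd then form one contiguous
--     run, and the exact match (if any) is the first element of that run.
--     """
--     xs = sorted(commands)
--     run = []
--     for s in xs:
--         if s.startswith(cmd):
--             run.append(s)
--         elif run:
--             break  # past the contiguous run of prefix matches
--     if len(run) == 1:
--         return run[0]
--     if run and run[0] == cmd:
--         return cmd
--     return None
-- ===== Notes on version B (the rewrite author's own statement) =====
-- stated objective: alternative
-- what changed: B sorts the commands and reads off the single contiguous run of prefix matches (breaking out as soon as the run ends), then decides by the run's length and whether the run's first element is the exact match, instead of A's filter pass plus a separate membership scan over the unsorted list.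
import Mathlib
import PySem

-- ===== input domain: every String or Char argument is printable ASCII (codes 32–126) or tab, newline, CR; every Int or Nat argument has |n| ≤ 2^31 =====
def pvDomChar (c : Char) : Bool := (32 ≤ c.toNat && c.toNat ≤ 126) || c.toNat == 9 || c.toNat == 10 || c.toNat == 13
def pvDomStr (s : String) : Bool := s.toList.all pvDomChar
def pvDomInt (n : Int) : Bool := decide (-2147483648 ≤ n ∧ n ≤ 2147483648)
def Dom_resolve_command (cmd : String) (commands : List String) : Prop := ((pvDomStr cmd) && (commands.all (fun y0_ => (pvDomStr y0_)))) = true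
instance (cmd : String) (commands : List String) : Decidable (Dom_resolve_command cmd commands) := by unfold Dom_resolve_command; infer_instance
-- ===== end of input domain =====

-- B sorts the commands and takes the contiguous run of prefix ms (exact match = run's
-- first element), instead of A's filter pass plus a separate membership scan; A = B everywhere on Dom.


-- ===== PORT A =====
def resolve_command (cmd : String) (commands : List String) : Option String :=
  let ms := commands.filter (fun c => PySem.Str.startswith c cmd)
  if ms.length = 1 then ms.head?
  else if commands.contains cmd then some cmd
  else none

-- ===== PORT B =====
-- the 'for s in xs: … break' loop of Source B, accumulating the run
def rcRun (cmd : String) (run : List String) : List String → List String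
  | [] => run
  | s :: t =>
    if PySem.Str.startswith s cmd then rcRun cmd (run ++ [s]) t
    else if run ≠ [] then run
    else rcRun cmd run t

def resolve_command_alt (cmd : String) (commands : List String) : Option String :=
  let xs := PySem.List.sorted commands (fun x => x) false
  let run := rcRun cmd [] xs
  if run.length = 1 then run.head?
  else
    match run with
    | r0 :: _ => if r0 = cmd then some cmd else none
    | [] => none

-- ===== PRECONDITION & SPEC =====
def Spec_resolve_command (cmd : String) (commands : List String) (out : Option String) : Prop := out = resolve_command_alt cmd commands
instance (cmd : String) (commands : List String) (out : Option String) : Decidable (Spec_resolve_command cmd commands out) := by unfold Spec_resolve_command; infer_instance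

-- ===== CLAIM (what is proved, stated in full; the proofs are below) =====
def Claim_equal_resolve_command : Prop := ∀ (cmd : String) (commands : List String), Dom_resolve_command cmd commands → Spec_resolve_command cmd commands (resolve_command cmd commands)

-- ===== LEMMAS AND PROOFS =====

theorem char_list_le_nil (xs : List Char) (h : xs ≤ []) : xs = [] := by
  rcases le_iff_lt_or_eq.mp h with h | h
  · cases h
  · exact h

theorem char_cons_le_cons (x y : Char) (xs ys : List Char) :
    (x :: xs) ≤ (y :: ys) ↔ x < y ∨ (x = y ∧ xs ≤ ys) := by
  constructor
  · intro h
    rcases le_iff_lt_or_eq.mp h with h | h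
    · cases h with
      | rel h => exact Or.inl h
      | cons h => exact Or.inr ⟨rfl, le_of_lt h⟩
    · injection h with h1 h2
      exact Or.inr ⟨h1, le_of_eq h2⟩
  · rintro (h | ⟨rfl, h⟩)
    · exact le_of_lt (List.Lex.rel h)
    · rcases le_iff_lt_or_eq.mp h with h | h
      · exact le_of_lt (List.Lex.cons h)
      · exact le_of_eq (by rw [h])

theorem char_prefix_le (p s : List Char) (h : p <+: s) : p ≤ s := by
  obtain ⟨t, rfl⟩ := h
  induction p with
  | nil =>
    cases t with
    | nil => exact le_refl _
    | cons c t => exact le_of_lt List.Lex.nil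
  | cons c cs ih => exact (char_cons_le_cons c c cs (cs ++ t)).mpr (Or.inr ⟨rfl, ih⟩)

-- convexity in lex order: a string between cmd and a prefix extension of cmd also extends cmd
theorem char_prefix_between (cmd a b : List Char) (hca : cmd ≤ a) (hab : a ≤ b)
    (hb : cmd <+: b) : cmd <+: a := by
  induction cmd generalizing a b with
  | nil => exact List.nil_prefix
  | cons c cs ih =>
    obtain ⟨t, rfl⟩ := hb
    cases a with
    | nil => simp [char_list_le_nil _ hca] 
    | cons a1 as =>
      rcases (char_cons_le_cons c a1 cs as).mp hca with h | ⟨rfl, hcsas⟩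
      · rcases (char_cons_le_cons a1 c as (cs ++ t)).mp hab with h' | ⟨rfl, _⟩
        · exact absurd (lt_trans h h') (lt_irrefl _)
        · exact absurd h (lt_irrefl _)
      · rcases (char_cons_le_cons c c as (cs ++ t)).mp hab with h' | ⟨_, hastl⟩
        · exact absurd h' (lt_irrefl _)
        · exact (List.prefix_cons_inj c).mpr (ih as (cs ++ t) hcsas hastl ⟨t, rfl⟩)

-- string level: a prefix match is ≥ cmd in Python's (= Lean's) string order
theorem le_of_startswith (cmd s : String) (h : PySem.Str.startswith s cmd = true) : cmd ≤ s := by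
  rw [String.le_iff_toList_le]
  exact char_prefix_le _ _ ((PySem.Chars.startswith_iff _ _).mp (by simpa using h))

theorem startswith_of_between (cmd a b : String) (hca : cmd ≤ a) (hab : a ≤ b)
    (hb : PySem.Str.startswith b cmd = true) : PySem.Str.startswith a cmd = true := by
  have hb' : cmd.toList <+: b.toList := (PySem.Chars.startswith_iff _ _).mp (by simpa using hb)
  have : cmd.toList <+: a.toList :=
    char_prefix_between _ _ _ (String.le_iff_toList_le.mp hca) (String.le_iff_toList_le.mp hab) hb'
  simpa using (PySem.Chars.startswith_iff _ _).mpr this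

theorem startswith_self (cmd : String) : PySem.Str.startswith cmd cmd = true := by
  simpa using (PySem.Chars.startswith_iff _ _).mpr (List.prefix_refl _)

-- the run loop over a sorted list collects exactly the prefix matches
theorem rcRun_eq (cmd : String) (run xs : List String)
    (hs : xs.Pairwise (· ≤ ·))
    (hrun : ∀ m ∈ run, PySem.Str.startswith m cmd = true)
    (hle : ∀ m ∈ run, ∀ x ∈ xs, m ≤ x) :
    rcRun cmd run xs = run ++ xs.filter (fun c => PySem.Str.startswith c cmd) := by
  induction xs generalizing run with
  | nil => simp [rcRun]
  | cons s t ih =>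
    rw [List.pairwise_cons] at hs
    by_cases hp : PySem.Str.startswith s cmd = true
    · rw [rcRun, if_pos hp,
        show List.filter (fun c => PySem.Str.startswith c cmd) (s :: t)
           = s :: List.filter (fun c => PySem.Str.startswith c cmd) t from
          List.filter_cons_of_pos hp,
        ih (run ++ [s]) hs.2
          (by intro m hm; rcases List.mem_append.mp hm with h | h
              · exact hrun m h
              · simp at h; subst h; exact hp)
          (by intro m hm x hx; rcases List.mem_append.mp hm with h | h
              · exact hle m h x (List.mem_cons_of_mem s hx)
              · simp at h; subst h; exact hs.1 x hx)]
      simp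
    · rw [rcRun, if_neg hp,
        show List.filter (fun c => PySem.Str.startswith c cmd) (s :: t)
           = List.filter (fun c => PySem.Str.startswith c cmd) t from
          List.filter_cons_of_neg (by simpa using hp)]
      cases hr : run with
      | nil =>
        subst hr
        rw [if_neg (by simp)]
        exact ih [] hs.2 (by simp) (by simp)
      | cons m ms =>
        rw [if_pos (by subst hr; simp)]
        have hfilt : t.filter (fun c => PySem.Str.startswith c cmd) = [] := by
          rw [List.filter_eq_nil_iff]
          intro x hx hpx
          have hm : PySem.Str.startswith m cmd = true := hrun m (by simp [hr])
          have hcm : cmd ≤ m := le_of_startswith cmd m hm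
          have hms : m ≤ s := hle m (by simp [hr]) s (List.mem_cons_self)
          have hsx : s ≤ x := hs.1 x hx
          exact hp (startswith_of_between cmd s x (le_trans hcm hms) hsx hpx)
        rw [hfilt]; simp

-- ===== VERDICT (by name: the statement is the Claim_ definition above) =====
theorem resolve_command_spec : Claim_equal_resolve_command := by
  intro cmd commands _
  show resolve_command cmd commands = resolve_command_alt cmd commands
  have hpair : (PySem.List.sorted commands (fun x => x) false).Pairwise (· ≤ ·) :=
    PySem.List.sorted_pairwise commands (fun x => x)
  have hperm : (PySem.List.sorted commands (fun x => x) false).Perm commands :=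
    PySem.List.sorted_perm commands (fun x => x) false
  have hrun : rcRun cmd [] (PySem.List.sorted commands (fun x => x) false)
      = (PySem.List.sorted commands (fun x => x) false).filter
          (fun c => PySem.Str.startswith c cmd) :=
    rcRun_eq cmd [] _ hpair (by simp) (by simp)
  have hA : resolve_command cmd commands =
      (if (commands.filter (fun c => PySem.Str.startswith c cmd)).length = 1 then
        (commands.filter (fun c => PySem.Str.startswith c cmd)).head?
       else if commands.contains cmd then some cmd else none) := rfl
  have hB : resolve_command_alt cmd commands =
      (if ((PySem.List.sorted commands (fun x => x) false).filter
            (fun c => PySem.Str.startswith c cmd)).length = 1 then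
        ((PySem.List.sorted commands (fun x => x) false).filter
            (fun c => PySem.Str.startswith c cmd)).head?
       else match (PySem.List.sorted commands (fun x => x) false).filter
            (fun c => PySem.Str.startswith c cmd) with
            | r0 :: _ => if r0 = cmd then some cmd else none
            | [] => none) := by
    have hstep : resolve_command_alt cmd commands =
        (if (rcRun cmd [] (PySem.List.sorted commands (fun x => x) false)).length = 1 then
          (rcRun cmd [] (PySem.List.sorted commands (fun x => x) false)).head?
         else match rcRun cmd [] (PySem.List.sorted commands (fun x => x) false) with
              | r0 :: _ => if r0 = cmd then some cmd else none
              | [] => none) := rfl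
    rw [hstep, hrun]
  rw [hA, hB]
  have hpermf : ((PySem.List.sorted commands (fun x => x) false).filter
        (fun c => PySem.Str.startswith c cmd)).Perm
      (commands.filter (fun c => PySem.Str.startswith c cmd)) :=
    hperm.filter _
  by_cases h1 : (commands.filter (fun c => PySem.Str.startswith c cmd)).length = 1
  · rw [if_pos h1, if_pos (show ((PySem.List.sorted commands (fun x => x) false).filter
        (fun c => PySem.Str.startswith c cmd)).length = 1 from by rw [hpermf.length_eq]; exact h1)]
    obtain ⟨u, hu⟩ := List.length_eq_one_iff.mp h1
    have hxu : (PySem.List.sorted commands (fun x => x) false).filter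
        (fun c => PySem.Str.startswith c cmd) = [u] :=
      List.perm_singleton.mp (hu ▸ hpermf)
    rw [hu, hxu]
  · rw [if_neg h1, if_neg (show ¬((PySem.List.sorted commands (fun x => x) false).filter
        (fun c => PySem.Str.startswith c cmd)).length = 1 from by rw [hpermf.length_eq]; exact h1)]
    have hpairf : ((PySem.List.sorted commands (fun x => x) false).filter
        (fun c => PySem.Str.startswith c cmd)).Pairwise (· ≤ ·) := hpair.filter _
    cases hr : (PySem.List.sorted commands (fun x => x) false).filter
        (fun c => PySem.Str.startswith c cmd) with
    | nil =>
      have hnotmem : cmd ∉ commands := by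
        intro hmem
        have hm : cmd ∈ (PySem.List.sorted commands (fun x => x) false).filter
            (fun c => PySem.Str.startswith c cmd) :=
          List.mem_filter.mpr ⟨hperm.mem_iff.mpr hmem, startswith_self cmd⟩
        rw [hr] at hm; exact absurd hm (List.not_mem_nil)
      simp [hnotmem]
    | cons r0 rt =>
      have hr0mem : r0 ∈ (PySem.List.sorted commands (fun x => x) false).filter
          (fun c => PySem.Str.startswith c cmd) := by
        rw [hr]; exact List.mem_cons_self
      have hr0p : PySem.Str.startswith r0 cmd = true := (List.mem_filter.mp hr0mem).2
      by_cases hc : cmd ∈ commands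
      · have hcmdf : cmd ∈ (PySem.List.sorted commands (fun x => x) false).filter
            (fun c => PySem.Str.startswith c cmd) :=
          List.mem_filter.mpr ⟨hperm.mem_iff.mpr hc, startswith_self cmd⟩
        have hr0cmd : r0 = cmd := by
          rw [hr] at hcmdf
          rcases List.mem_cons.mp hcmdf with h | h
          · exact h.symm
          · refine le_antisymm ?_ (le_of_startswith cmd r0 hr0p)
            rw [hr] at hpairf
            exact (List.pairwise_cons.mp hpairf).1 cmd h
        simp [hc, hr0cmd]
      · have hr0ne : ¬ r0 = cmd := by
          intro he
          exact hc (hperm.mem_iff.mp (by rw [← he]; exact (List.mem_filter.mp hr0mem).1))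
        simp [hc, hr0ne]
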